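-- pv_equiv track=rewrite | github.com/comfyhub-org/comfygit-manager | server/api/v2/remotes.py | _consolidate_remotes
-- ===== SOURCE A (Python) =====
-- def _consolidate_remotes(remote_list: list[tuple[str, str, str]]) -> list[dict]:
--     """
--     Consolidate git remote -v output into RemoteInfo structures.
--
--     Args:
--         remote_list: List of (name, url, type) tuples where type is 'fetch' or 'push'
--
--     Returns:
--         List of dicts with name, fetch_url, push_url
--     """
--     remotes = {}
--     for name, url, remote_type in remote_list:
--         if name not in remotes:
--             remotes[name] = {"name": name, "fetch_url": "", "push_url": ""}
--
--         if remote_type == "fetch":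
--             remotes[name]["fetch_url"] = url
--         elif remote_type == "push":
--             remotes[name]["push_url"] = url
--
--     # If push_url is empty, default to fetch_url
--     for remote in remotes.values():
--         if not remote["push_url"]:
--             remote["push_url"] = remote["fetch_url"]
--
--     return list(remotes.values())
-- ===== SOURCE B (Python) =====
-- def _consolidate_remotes(remote_list: list[tuple[str, str, str]]) -> list[dict]:
--     """Two-pass version: collect unique names in first-appearance order, then
--     re-scan the whole list per name, letting the last matching fetch/push win."""
--     names = []
--     for name, _, _ in remote_list:
--         if name not in names:
--             names.append(name)
--     result = []
--     for name in names:
--         fetch = ""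
--         push = ""
--         for n, url, remote_type in remote_list:
--             if n == name:
--                 if remote_type == "fetch":
--                     fetch = url
--                 elif remote_type == "push":
--                     push = url
--         result.append({"name": name, "fetch_url": fetch, "push_url": push or fetch})
--     return result
-- ===== Notes on version B (the rewrite author's own statement) =====
-- stated objective: alternative
-- what changed: Replaces the single grouping pass over a dict-of-dicts with a two-pass scheme: first collect unique remote names in first-appearance order, then re-scan the whole list per name with last-match-wins fetch/push accumulation, so no dict is built at all.
import Mathlib
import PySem

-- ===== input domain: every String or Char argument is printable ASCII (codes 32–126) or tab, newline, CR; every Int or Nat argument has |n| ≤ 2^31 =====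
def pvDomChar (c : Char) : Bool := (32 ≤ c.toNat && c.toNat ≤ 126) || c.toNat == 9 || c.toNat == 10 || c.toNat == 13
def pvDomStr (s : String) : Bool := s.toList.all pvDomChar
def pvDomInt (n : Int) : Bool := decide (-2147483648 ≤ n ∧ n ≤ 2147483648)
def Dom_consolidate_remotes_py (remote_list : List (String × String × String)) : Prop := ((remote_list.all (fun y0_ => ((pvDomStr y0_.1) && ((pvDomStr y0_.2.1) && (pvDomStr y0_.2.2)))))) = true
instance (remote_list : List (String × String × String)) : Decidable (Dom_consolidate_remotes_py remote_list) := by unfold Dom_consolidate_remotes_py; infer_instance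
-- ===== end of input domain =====

-- B replaces the one-pass dict-of-dicts grouping by a two-pass scheme (unique names, then a
-- last-match-wins re-scan per name); alternative decomposition, same results, no speed claim.


-- ===== PORT A =====
-- the fresh entry {"name": name, "fetch_url": "", "push_url": ""}
def pvBase (name : String) : PySem.Dict String String :=
  PySem.Dict.ofList [("name", name), ("fetch_url", ""), ("push_url", "")]

-- one iteration of A's first loop (remotes[name][...] = url is a read-then-overwrite of the
-- entry at name, which is always present after the membership guard)
def pvAStep (d : PySem.Dict String (PySem.Dict String String))
    (t : String × String × String) : PySem.Dict String (PySem.Dict String String) :=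
  let d1 := if d.contains t.1 then d else d.insert t.1 (pvBase t.1)
  if t.2.2 == "fetch" then d1.insert t.1 ((d1.getD t.1 PySem.Dict.empty).insert "fetch_url" t.2.1)
  else if t.2.2 == "push" then d1.insert t.1 ((d1.getD t.1 PySem.Dict.empty).insert "push_url" t.2.1)
  else d1

-- A's second loop body: default push_url to fetch_url when falsy (empty)
def pvAFix (r : PySem.Dict String String) : PySem.Dict String String :=
  if (r.getD "push_url" "") == "" then r.insert "push_url" (r.getD "fetch_url" "") else r

def consolidate_remotes_py (remote_list : List (String × String × String)) : List (List (String × String)) :=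
  let remotes := remote_list.foldl pvAStep PySem.Dict.empty
  (remotes.values.map pvAFix).map (fun r => r.items)

-- ===== PORT B =====
-- B's first loop: unique names in first-appearance order
def pvNamesStep (ns : List String) (t : String × String × String) : List String :=
  if ns.contains t.1 then ns else ns ++ [t.1]

-- B's inner re-scan step: overwrite (fetch, push) on a matching tuple, last one wins
def pvGStep (name : String) (fp : String × String) (t : String × String × String) : String × String :=
  if t.1 == name then
    (if t.2.2 == "fetch" then (t.2.1, fp.2) else if t.2.2 == "push" then (fp.1, t.2.1) else fp)
  else fp

def consolidate_remotes_py_alt (remote_list : List (String × String × String)) : List (List (String × String)) :=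
  let names := remote_list.foldl pvNamesStep []
  names.map (fun name =>
    let fp := remote_list.foldl (pvGStep name) ("", "")
    [("name", name), ("fetch_url", fp.1), ("push_url", if fp.2 == "" then fp.1 else fp.2)])

-- ===== PRECONDITION & SPEC =====
def Spec_consolidate_remotes_py (remote_list : List (String × String × String)) (out : List (List (String × String))) : Prop := out = consolidate_remotes_py_alt remote_list
instance (remote_list : List (String × String × String)) (out : List (List (String × String))) : Decidable (Spec_consolidate_remotes_py remote_list out) := by unfold Spec_consolidate_remotes_py; infer_instance

-- ===== CLAIM (what is proved, stated in full; the proofs are below) =====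
def Claim_equal_consolidate_remotes_py : Prop := ∀ (remote_list : List (String × String × String)), Dom_consolidate_remotes_py remote_list → Spec_consolidate_remotes_py remote_list (consolidate_remotes_py remote_list)

-- ===== LEMMAS AND PROOFS =====

def pvUpd (r : PySem.Dict String String) (t : String × String × String) : PySem.Dict String String :=
  if t.2.2 == "fetch" then r.insert "fetch_url" t.2.1
  else if t.2.2 == "push" then r.insert "push_url" t.2.1
  else r

lemma pvAStep_get? (d : PySem.Dict String (PySem.Dict String String)) (t : String × String × String) (n : String) :
    (pvAStep d t).get? n =
      if t.1 = n then some (pvUpd ((d.get? t.1).getD (pvBase t.1)) t) else d.get? n := by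
  obtain ⟨name, url, rt⟩ := t
  simp only [pvAStep, pvUpd]
  set d1 := if d.contains name then d else d.insert name (pvBase name) with hd1
  have h1 : d1.get? name = some ((d.get? name).getD (pvBase name)) := by
    by_cases hc : d.contains name
    · have := hc
      rw [PySem.Dict.contains_eq_isSome_get?] at this
      rcases hq : d.get? name with _ | r
      · rw [hq] at this; simp at this
      · simp [hd1, hc, hq]
    · have hq : d.get? name = none := by
        rw [PySem.Dict.get?_eq_none_iff_contains]
        simpa using hc
      simp [hd1, hc, hq, PySem.Dict.get?_insert_self]
  have h2 : ∀ m, m ≠ name → d1.get? m = d.get? m := by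
    intro m hm
    by_cases hc : d.contains name
    · simp [hd1, hc]
    · simp [hd1, hc, PySem.Dict.get?_insert_of_ne _ _ hm]
  have hgd : d1.getD name PySem.Dict.empty = (d.get? name).getD (pvBase name) := by
    rw [PySem.Dict.getD_eq_get?_getD, h1]; rfl
  by_cases hn : name = n
  · subst hn
    rw [if_pos rfl]
    split_ifs with hf hp
    · simp [PySem.Dict.get?_insert_self, hgd]
    · simp [PySem.Dict.get?_insert_self, hgd]
    · simp [h1]
  · have hnn : n ≠ name := fun h => hn h.symm
    rw [if_neg hn]
    split_ifs with hf hp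
    · simp [PySem.Dict.get?_insert_of_ne _ _ hnn, h2 n hnn]
    · simp [PySem.Dict.get?_insert_of_ne _ _ hnn, h2 n hnn]
    · simp [h2 n hnn]

def pvApplyA (n : String) (rl : List (String × String × String)) (r : PySem.Dict String String) : PySem.Dict String String :=
  rl.foldl (fun r t => if t.1 == n then pvUpd r t else r) r

lemma pvFoldl_get? (rl : List (String × String × String)) (d : PySem.Dict String (PySem.Dict String String)) (n : String) :
    (rl.foldl pvAStep d).get? n =
      match d.get? n with
      | some r => some (pvApplyA n rl r)
      | none => if (rl.map (·.1)).contains n then some (pvApplyA n rl (pvBase n)) else none := by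
  induction rl generalizing d with
  | nil => cases h : d.get? n <;> simp [pvApplyA, h]
  | cons t rl ih =>
    rw [List.foldl_cons, ih, pvAStep_get?]
    by_cases ht : t.1 = n
    · rw [if_pos ht]
      cases h : d.get? n with
      | some r => simp [h, pvApplyA, ht]
      | none => simp [h, pvApplyA, ht]
    · rw [if_neg ht]
      cases h : d.get? n with
      | some r => simp [pvApplyA, ht]
      | none =>
        have hc : (t.1 :: List.map (fun x => x.1) rl).contains n = (List.map (fun x => x.1) rl).contains n := by
          simp [Ne.symm ht]
        simp only [List.map_cons]
        simp only [hc]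
        simp [pvApplyA, ht]


lemma pvContains_keys (d : PySem.Dict String (PySem.Dict String String)) (x : String) :
    d.contains x = d.keys.contains x := by
  by_cases h : x ∈ d.keys
  · rw [(PySem.Dict.contains_iff_mem_keys d x).mpr h, List.contains_iff_mem.mpr h]
  · have h1 : d.contains x = false := by
      by_contra hc
      exact h ((PySem.Dict.contains_iff_mem_keys d x).mp (by simpa using hc))
    have h2 : d.keys.contains x = false := by
      by_contra hc
      exact h (List.contains_iff_mem.mp (by simpa using hc))
    rw [h1, h2]

lemma pvAStep_keys (d : PySem.Dict String (PySem.Dict String String)) (t : String × String × String) :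
    (pvAStep d t).keys = pvNamesStep d.keys t := by
  simp only [pvAStep, pvNamesStep, ← pvContains_keys]
  by_cases hc : d.contains t.1
  · simp only [hc, if_true]
    split_ifs
    · exact PySem.Dict.keys_insert_of_contains _ _ hc
    · exact PySem.Dict.keys_insert_of_contains _ _ hc
    · rfl
  · simp only [hc, Bool.false_eq_true, if_false]
    have hcf : d.contains t.1 = false := by simpa using hc
    have h1 : (d.insert t.1 (pvBase t.1)).keys = d.keys ++ [t.1] :=
      PySem.Dict.keys_insert_of_not_contains _ _ hcf
    have h2 : (d.insert t.1 (pvBase t.1)).contains t.1 = true := PySem.Dict.contains_insert_self _ _ _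
    split_ifs
    · rw [PySem.Dict.keys_insert_of_contains _ _ h2, h1]
    · rw [PySem.Dict.keys_insert_of_contains _ _ h2, h1]
    · exact h1

lemma pvFoldl_keys (rl : List (String × String × String)) (d : PySem.Dict String (PySem.Dict String String)) :
    (rl.foldl pvAStep d).keys = rl.foldl pvNamesStep d.keys := by
  induction rl generalizing d with
  | nil => rfl
  | cons t rl ih => rw [List.foldl_cons, List.foldl_cons, ih, pvAStep_keys]

lemma pvNames_nodup (rl : List (String × String × String)) (ns : List String) (h : ns.Nodup) :
    (rl.foldl pvNamesStep ns).Nodup := by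
  induction rl generalizing ns with
  | nil => exact h
  | cons t rl ih =>
    rw [List.foldl_cons]
    apply ih
    unfold pvNamesStep
    split_ifs with hc
    · exact h
    · have hnm : t.1 ∉ ns := fun hm => hc (List.contains_iff_mem.mpr hm)
      simp [List.nodup_append, h]
      intro x hx hxe
      exact hnm (hxe ▸ hx)

lemma pvMem_names (rl : List (String × String × String)) (ns : List String) (n : String) :
    n ∈ rl.foldl pvNamesStep ns ↔ n ∈ ns ∨ n ∈ rl.map (·.1) := by
  induction rl generalizing ns with
  | nil => simp
  | cons t rl ih =>
    rw [List.foldl_cons, ih]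
    unfold pvNamesStep
    split_ifs with hc
    · have hm : t.1 ∈ ns := List.contains_iff_mem.mp hc
      simp only [List.map_cons, List.mem_cons]
      constructor
      · rintro (h | h)
        · exact Or.inl h
        · exact Or.inr (Or.inr h)
      · rintro (h | h | h)
        · exact Or.inl h
        · exact Or.inl (h ▸ hm)
        · exact Or.inr h
    · simp only [List.mem_append, List.map_cons, List.mem_cons]
      tauto


lemma pvMk_insert_fetch (n f p u : String) :
    (PySem.Dict.mk [("name", n), ("fetch_url", f), ("push_url", p)]).insert "fetch_url" u =
      PySem.Dict.mk [("name", n), ("fetch_url", u), ("push_url", p)] := by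
  rfl

lemma pvMk_insert_push (n f p u : String) :
    (PySem.Dict.mk [("name", n), ("fetch_url", f), ("push_url", p)]).insert "push_url" u =
      PySem.Dict.mk [("name", n), ("fetch_url", f), ("push_url", u)] := by
  rfl

lemma pvUpd_mk (n f p : String) (t : String × String × String) (hb : (t.1 == n) = true) :
    pvUpd (PySem.Dict.mk [("name", n), ("fetch_url", f), ("push_url", p)]) t =
      PySem.Dict.mk [("name", n), ("fetch_url", (pvGStep n (f, p) t).1),
                     ("push_url", (pvGStep n (f, p) t).2)] := by
  unfold pvUpd pvGStep
  rw [if_pos hb]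
  split_ifs with h1 h2
  · rw [pvMk_insert_fetch]
  · rw [pvMk_insert_push]
  · rfl

lemma pvApplyA_mk (rl : List (String × String × String)) (n f p : String) :
    pvApplyA n rl (PySem.Dict.mk [("name", n), ("fetch_url", f), ("push_url", p)]) =
      PySem.Dict.mk [("name", n), ("fetch_url", (rl.foldl (pvGStep n) (f, p)).1),
                     ("push_url", (rl.foldl (pvGStep n) (f, p)).2)] := by
  induction rl generalizing f p with
  | nil => rfl
  | cons t rl ih =>
    simp only [pvApplyA, List.foldl_cons] at *
    by_cases ht : t.1 = n
    · have hb : (t.1 == n) = true := by simp [ht]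
      rw [if_pos hb, pvUpd_mk n f p t hb]
      have := ih (pvGStep n (f, p) t).1 (pvGStep n (f, p) t).2
      simpa using this
    · have hb : (t.1 == n) = false := by simp [ht]
      rw [if_neg (by simp [hb])]
      have hg : pvGStep n (f, p) t = (f, p) := by simp [pvGStep, hb]
      rw [hg]
      exact ih f p


lemma pvFix_items (n f p : String) :
    (pvAFix (PySem.Dict.mk [("name", n), ("fetch_url", f), ("push_url", p)])).items =
      [("name", n), ("fetch_url", f), ("push_url", if p == "" then f else p)] := by
  have hgp : (PySem.Dict.mk [("name", n), ("fetch_url", f), ("push_url", p)]).getD "push_url" "" = p := by rfl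
  have hgf : (PySem.Dict.mk [("name", n), ("fetch_url", f), ("push_url", p)]).getD "fetch_url" "" = f := by rfl
  unfold pvAFix
  rw [hgp, hgf]
  split_ifs with hp
  · rw [pvMk_insert_push]
  · rfl


lemma pvFinal (rl : List (String × String × String)) :
    consolidate_remotes_py rl = consolidate_remotes_py_alt rl := by
  show (((rl.foldl pvAStep PySem.Dict.empty).values.map pvAFix).map (fun r => r.items)) =
    (rl.foldl pvNamesStep []).map (fun name =>
      [("name", name), ("fetch_url", (rl.foldl (pvGStep name) ("", "")).1),
       ("push_url", if (rl.foldl (pvGStep name) ("", "")).2 == "" then (rl.foldl (pvGStep name) ("", "")).1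
        else (rl.foldl (pvGStep name) ("", "")).2)])
  have hkeys : (rl.foldl pvAStep PySem.Dict.empty).keys = rl.foldl pvNamesStep [] := by
    rw [pvFoldl_keys]
    simp [PySem.Dict.keys_empty]
  have hnd : (rl.foldl pvAStep PySem.Dict.empty).keys.Nodup := by
    rw [hkeys]; exact pvNames_nodup rl [] List.nodup_nil
  rw [PySem.Dict.values_eq_map_keys _ hnd PySem.Dict.empty, List.map_map, List.map_map, hkeys]
  apply List.map_congr_left
  intro n hn
  have hmem : n ∈ rl.map (·.1) := by
    rcases (pvMem_names rl [] n).mp hn with h | h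
    · simp at h
    · exact h
  have hget : (rl.foldl pvAStep PySem.Dict.empty).get? n = some (pvApplyA n rl (pvBase n)) := by
    rw [pvFoldl_get?]
    simp only [PySem.Dict.get?_empty]
    exact if_pos (List.contains_iff_mem.mpr hmem)
  have hgd : (rl.foldl pvAStep PySem.Dict.empty).getD n PySem.Dict.empty =
      PySem.Dict.mk [("name", n), ("fetch_url", (rl.foldl (pvGStep n) ("", "")).1),
                     ("push_url", (rl.foldl (pvGStep n) ("", "")).2)] := by
    rw [PySem.Dict.getD_eq_get?_getD, hget, Option.getD_some]
    exact pvApplyA_mk rl n "" ""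
  simp only [Function.comp_apply, hgd, pvFix_items]

-- ===== VERDICT (by name: the statement is the Claim_ definition above) =====
theorem consolidate_remotes_py_spec : Claim_equal_consolidate_remotes_py := by
  intro remote_list _
  unfold Spec_consolidate_remotes_py
  exact pvFinal remote_list
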